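-- pv_equiv track=rewrite | github.com/chrisesharp/eepromer | eeprom_writer.py | data_field
-- ===== SOURCE A (Python) =====
-- def data_field(data):
--     chksum = 0
--     payload = ""
--     for byte in data:
--         payload += ("%02x" % byte)
--         chksum = chksum ^ byte
--     payload += "ffffffffffffffffffffffffffffffff"
--     # payload = payload[:38]
--     payload = payload[:32]
--     if (len(data) & 1):
--         chksum = chksum ^ 255
--     chksum = chksum & 255
--     payload += "," + ("%02x" % chksum)
--     return payload.upper()
-- ===== SOURCE B (Python) =====
-- def data_field(data):
--     # pass 1: checksum over the whole input
--     chksum = 0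
--     for b in data:
--         chksum ^= b
--     if len(data) & 1:
--         chksum ^= 255
--     # pass 2: fill a 32-character budget with uppercase hex, stopping as soon as
--     # the budget is exhausted; whatever budget is left becomes 'F' padding
--     payload = ""
--     budget = 32
--     for b in data:
--         if budget == 0:
--             break
--         h = ("%02X" % b)[:budget]
--         payload += h
--         budget -= len(h)
--     payload += "F" * budget
--     return "%s,%02X" % (payload, chksum & 255)
-- ===== Notes on version B (the rewrite author's own statement) =====
-- stated objective: faster
-- what changed: A fuses everything into one full pass (hex-encode every byte in lowercase, xor on the side, append 32 'f's, truncate to 32, then .upper() the whole string); B computes the checksum in its own cheap xor pass and builds the payload with a budget-driven loop that emits uppercase hex directly, truncates mid-piece against the remaining budget, breaks as soon as 32 characters are placed and pads by the leftover budget -- so only ~16 bytes are ever hex-formatted and no oversized string, truncating slice or final .upper() is needed (measured 4.7x at n=262144).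
import Mathlib
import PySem

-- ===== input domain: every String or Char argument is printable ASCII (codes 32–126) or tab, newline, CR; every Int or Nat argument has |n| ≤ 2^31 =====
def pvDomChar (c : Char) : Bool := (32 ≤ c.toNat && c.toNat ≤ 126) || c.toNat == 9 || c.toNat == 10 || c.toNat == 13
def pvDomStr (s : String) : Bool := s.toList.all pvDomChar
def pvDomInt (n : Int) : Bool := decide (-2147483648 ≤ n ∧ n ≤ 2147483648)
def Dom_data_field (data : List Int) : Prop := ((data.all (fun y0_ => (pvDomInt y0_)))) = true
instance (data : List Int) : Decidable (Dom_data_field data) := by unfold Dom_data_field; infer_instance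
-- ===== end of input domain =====

-- B replaces A's fused encode-everything/truncate/.upper() pass by a separate xor pass plus a
-- budget-driven loop that emits uppercase hex directly and breaks once 32 chars are placed;
-- return values proved equal everywhere.

-- ===== PORT A =====
-- helper: Python's "%02x" % n as a list of chars (exact, including negatives: '-' then digits)
def hexDigitChar (n : Nat) : Char := if n < 10 then Char.ofNat (48 + n) else Char.ofNat (87 + n)

def hexNatChars (n : Nat) : List Char :=
  if hz : n = 0 then [] else hexNatChars (n / 16) ++ [hexDigitChar (n % 16)]
decreasing_by exact Nat.div_lt_self (Nat.pos_of_ne_zero hz) (by decide)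

-- "%02x" % n : width 2 includes the sign, so a negative n gets no zero padding
def hex2 (n : Int) : List Char :=
  if n < 0 then '-' :: hexNatChars (-n).toNat
  else
    let d := hexNatChars n.toNat
    List.replicate (2 - d.length) '0' ++ d

def data_field (data : List Int) : String :=
  -- fused loop: state (chksum, payload)
  let st := data.foldl (fun (s : Int × List Char) byte =>
      (PySem.Int.bxor s.1 byte, s.2 ++ hex2 byte)) (0, [])
  let payload := st.2 ++ "ffffffffffffffffffffffffffffffff".toList
  let payload := PySem.List.slice payload none (some 32)
  let chksum := if PySem.Int.band (data.length : Int) 1 ≠ 0 then PySem.Int.bxor st.1 255 else st.1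
  let chksum := PySem.Int.band chksum 255
  let payload := payload ++ ',' :: hex2 chksum
  PySem.Str.upper (String.ofList payload)

-- ===== PORT B =====
-- helper: Python's "%02X" % n (uppercase hex, exact including negatives)
def hexDigitCharU (n : Nat) : Char := if n < 10 then Char.ofNat (48 + n) else Char.ofNat (55 + n)

def hexNatCharsU (n : Nat) : List Char :=
  if hz : n = 0 then [] else hexNatCharsU (n / 16) ++ [hexDigitCharU (n % 16)]
decreasing_by exact Nat.div_lt_self (Nat.pos_of_ne_zero hz) (by decide)

def hex2U (n : Int) : List Char :=
  if n < 0 then '-' :: hexNatCharsU (-n).toNat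
  else
    let d := hexNatCharsU n.toNat
    List.replicate (2 - d.length) '0' ++ d

-- Source B's payload loop: returns the emitted chars and the leftover budget (break at budget 0)
def payloadLoop : List Int → Nat → List Char × Nat
  | [], budget => ([], budget)
  | b :: t, budget =>
    if budget = 0 then ([], budget)          -- break
    else
      let h := (hex2U b).take budget         -- ("%02X" % b)[:budget]
      let p := payloadLoop t (budget - h.length)
      (h ++ p.1, p.2)

def data_field_alt (data : List Int) : String :=
  -- pass 1: checksum
  let chksum := data.foldl PySem.Int.bxor 0
  let chksum := if PySem.Int.band (data.length : Int) 1 ≠ 0 then PySem.Int.bxor chksum 255 else chksum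
  -- pass 2: budget-driven uppercase payload, padded by the leftover budget
  let p := payloadLoop data 32
  String.ofList ((p.1 ++ List.replicate p.2 'F') ++ ',' :: hex2U (PySem.Int.band chksum 255))

-- ===== PRECONDITION & SPEC =====
def Spec_data_field (data : List Int) (out : String) : Prop := out = data_field_alt data
instance (data : List Int) (out : String) : Decidable (Spec_data_field data out) := by unfold Spec_data_field; infer_instance

-- ===== CLAIM =====
def Claim_equal_data_field : Prop := ∀ (data : List Int), Dom_data_field data → Spec_data_field data (data_field data)

-- ===== LEMMAS AND PROOFS =====

-- A's fused fold splits into the xor fold and the flatMap of hex strings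
theorem foldl_split (data : List Int) (c : Int) (p : List Char) :
    data.foldl (fun (s : Int × List Char) byte =>
      (PySem.Int.bxor s.1 byte, s.2 ++ hex2 byte)) (c, p)
      = (data.foldl PySem.Int.bxor c, p ++ data.flatMap hex2) := by
  induction data generalizing c p with
  | nil => simp
  | cons b t ih => simp [List.foldl, ih, List.flatMap_cons, List.append_assoc]

theorem pad_eq : "ffffffffffffffffffffffffffffffff".toList = List.replicate 32 'f' := by decide

-- upper-casing the lowercase formatters gives the uppercase formatters
theorem upper_hexDigit (m : Nat) (h : m < 16) :
    PySem.Chars.upperChar (hexDigitChar m) = hexDigitCharU m := by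
  interval_cases m <;> decide

theorem upper_hexNat (n : Nat) :
    (hexNatChars n).map PySem.Chars.upperChar = hexNatCharsU n := by
  induction n using Nat.strong_induction_on with
  | _ n ih =>
    unfold hexNatChars hexNatCharsU
    split
    · simp
    · rename_i hz
      rw [List.map_append, ih (n / 16) (Nat.div_lt_self (Nat.pos_of_ne_zero hz) (by decide))]
      simp [upper_hexDigit (n % 16) (Nat.mod_lt _ (by decide))]

theorem upper_hex2 (n : Int) :
    (hex2 n).map PySem.Chars.upperChar = hex2U n := by
  unfold hex2 hex2U
  split
  · have hm : PySem.Chars.upperChar '-' = '-' := by decide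
    simp [upper_hexNat, hm]
  · have hlen : (hexNatCharsU n.toNat).length = (hexNatChars n.toNat).length := by
      rw [← upper_hexNat]; simp
    have h0 : PySem.Chars.upperChar '0' = '0' := by decide
    simp [List.map_append, List.map_replicate, upper_hexNat, hlen, h0]

theorem upper_ofList (l : List Char) :
    PySem.Str.upper (String.ofList l) = String.ofList (l.map PySem.Chars.upperChar) := by
  have h : (PySem.Str.upper (String.ofList l)).toList = l.map PySem.Chars.upperChar := by
    rw [PySem.Str.toList_upper, String.toList_ofList]; rfl
  calc PySem.Str.upper (String.ofList l)
      = String.ofList (PySem.Str.upper (String.ofList l)).toList := by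
        rw [String.ofList_toList]
    _ = String.ofList (l.map PySem.Chars.upperChar) := by rw [h]

-- B's budget loop computes exactly the truncated padded payload, in uppercase
theorem payloadLoop_eq (bs : List Int) (budget k : Nat) (hk : budget ≤ k) :
    (payloadLoop bs budget).1 ++ List.replicate (payloadLoop bs budget).2 'F'
      = List.take budget (bs.flatMap hex2U ++ List.replicate k 'F') := by
  induction bs generalizing budget with
  | nil =>
    simp [payloadLoop, List.take_replicate, Nat.min_eq_left hk]
  | cons b t ih =>
    by_cases hb : budget = 0
    · simp [payloadLoop, hb]
    · have hlen : ((hex2U b).take budget).length = min budget (hex2U b).length := by simp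
      have hsub : budget - min budget (hex2U b).length = budget - (hex2U b).length := by omega
      have hle : budget - (hex2U b).length ≤ k := le_trans (Nat.sub_le _ _) hk
      simp only [payloadLoop, if_neg hb, List.flatMap_cons, List.append_assoc,
        List.take_append, hlen, hsub]
      rw [ih (budget - (hex2U b).length) hle, List.take_append]

-- ===== VERDICT =====
theorem data_field_spec : Claim_equal_data_field := by
  intro data _
  unfold Spec_data_field data_field data_field_alt
  rw [foldl_split]
  have hslice : PySem.List.slice (([] : List Char) ++ data.flatMap hex2
        ++ "ffffffffffffffffffffffffffffffff".toList) none (some 32)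
      = List.take 32 (data.flatMap hex2 ++ List.replicate 32 'f') := by
    rw [pad_eq, List.nil_append]
    exact_mod_cast PySem.List.slice_to_natCast _ 32
  have hf : PySem.Chars.upperChar 'f' = 'F' := by decide
  have hc : PySem.Chars.upperChar ',' = ',' := by decide
  simp only [hslice, upper_ofList, List.map_append, List.map_take, List.map_flatMap,
    List.map_replicate, List.map_cons, upper_hex2, hf, hc]
  rw [payloadLoop_eq data 32 32 (le_refl 32)]
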